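-- pv_equiv track=rewrite | github.com/bruno-pisciotta281/teste_qualidade | TDD/mictorios/distribuicao_mictorios.py | calcular_mijoes_nao_constrangedores
-- ===== SOURCE A (Python) =====
-- def calcular_mijoes_nao_constrangedores(ocupacao_inicial):
--     mijoes_nao_constrangedores = 0
--     mictorios_vazios = 0
--     consecutivo_ocupado = False
--
--     for c in ocupacao_inicial:
--         if c == 'X':
--             if consecutivo_ocupado:
--                 # Encontrou dois mictórios ocupados consecutivos, então não pode acomodar um mijão aqui.
--                 mijoes_nao_constrangedores += mictorios_vazios
--                 mictorios_vazios = 0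
--             consecutivo_ocupado = True
--         elif c == '.':
--             mictorios_vazios += 1
--             consecutivo_ocupado = False
--
--     # Caso especial: se a string terminar com mictórios vazios consecutivos.
--     if consecutivo_ocupado:
--         mijoes_nao_constrangedores += mictorios_vazios
--
--     return mijoes_nao_constrangedores
-- ===== SOURCE B (Python) =====
-- def calcular_mijoes_nao_constrangedores(ocupacao_inicial):
--     # Run-based rewrite: pre-filter to the relevant chars, then walk runs of
--     # equal characters instead of single characters.
--     filtered = [c for c in ocupacao_inicial if c in ('X', '.')]
--     res = 0
--     v = 0
--     i = 0
--     n = len(filtered)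
--     while i < n:
--         j = i
--         while j < n and filtered[j] == filtered[i]:
--             j += 1
--         if filtered[i] == '.':
--             v += j - i
--         elif j - i >= 2:
--             res += v
--             v = 0
--         i = j
--     if n > 0 and filtered[n - 1] == 'X':
--         res += v
--     return res
-- ===== Notes on version B (the rewrite author's own statement) =====
-- stated objective: alternative
-- what changed: Replaced A's char-by-char scan with a consecutive-occupied flag by a pre-filter to the two relevant characters followed by a walk over maximal runs of equal characters (a '.'-run adds its length, an 'X'-run of length >= 2 flushes, a final 'X'-run flushes at the end).
import Mathlib
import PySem

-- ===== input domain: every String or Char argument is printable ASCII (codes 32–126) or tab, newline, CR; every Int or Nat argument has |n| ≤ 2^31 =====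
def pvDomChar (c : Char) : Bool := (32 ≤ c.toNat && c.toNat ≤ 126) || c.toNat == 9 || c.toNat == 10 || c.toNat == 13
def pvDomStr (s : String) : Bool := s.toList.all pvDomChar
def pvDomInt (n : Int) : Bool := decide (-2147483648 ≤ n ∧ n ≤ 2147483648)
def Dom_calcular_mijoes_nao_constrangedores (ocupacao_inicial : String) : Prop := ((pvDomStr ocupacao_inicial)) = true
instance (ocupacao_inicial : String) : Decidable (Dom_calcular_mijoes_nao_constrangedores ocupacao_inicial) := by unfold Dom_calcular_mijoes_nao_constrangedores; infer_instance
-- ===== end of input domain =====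

-- B replaces A's char-by-char scan with a pre-filter to the two relevant characters
-- followed by a walk over runs of equal characters (objective: alternative decomposition).

-- ===== PORT A =====
-- A's loop state: (mijoes_nao_constrangedores, mictorios_vazios, consecutivo_ocupado)
def pvStepA (st : Int × Int × Bool) (c : Char) : Int × Int × Bool :=
  if c = 'X' then
    if st.2.2 then (st.1 + st.2.1, 0, true) else (st.1, st.2.1, true)
  else if c = '.' then (st.1, st.2.1 + 1, false)
  else st

def calcular_mijoes_nao_constrangedores (ocupacao_inicial : String) : Int :=
  let st := ocupacao_inicial.toList.foldl pvStepA (0, 0, false)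
  if st.2.2 then st.1 + st.2.1 else st.1

-- ===== PORT B =====
-- the while-loop of Source B: peel off one maximal run of equal characters per step
def pvRuns : List Char → Int → Int → Int × Int
  | [], res, v => (res, v)
  | c :: rest, res, v =>
    let run := rest.takeWhile (· == c)
    let tail := rest.dropWhile (· == c)
    if c = '.' then pvRuns tail res (v + (run.length + 1))
    else if run.length + 1 ≥ 2 then pvRuns tail (res + v) 0
    else pvRuns tail res v
termination_by l _ _ => l.length
decreasing_by
  all_goals
    have := List.length_dropWhile_le (· == c) rest
    simp only [List.length_cons]
    omega

def calcular_mijoes_nao_constrangedores_alt (ocupacao_inicial : String) : Int :=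
  let filtered := ocupacao_inicial.toList.filter (fun c => c == 'X' || c == '.')
  let rv := pvRuns filtered 0 0
  match filtered.getLast? with
  | some c => if c = 'X' then rv.1 + rv.2 else rv.1
  | none => rv.1

-- ===== PRECONDITION & SPEC =====
def Spec_calcular_mijoes_nao_constrangedores (ocupacao_inicial : String) (out : Int) : Prop := out = calcular_mijoes_nao_constrangedores_alt ocupacao_inicial
instance (ocupacao_inicial : String) (out : Int) : Decidable (Spec_calcular_mijoes_nao_constrangedores ocupacao_inicial out) := by unfold Spec_calcular_mijoes_nao_constrangedores; infer_instance

-- ===== CLAIM (what is proved, stated in full; the proofs are below) =====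
def Claim_equal_calcular_mijoes_nao_constrangedores : Prop := ∀ (ocupacao_inicial : String), Dom_calcular_mijoes_nao_constrangedores ocupacao_inicial → Spec_calcular_mijoes_nao_constrangedores ocupacao_inicial (calcular_mijoes_nao_constrangedores ocupacao_inicial)

-- ===== LEMMAS AND PROOFS =====

-- the final flush of A
def pvFin (st : Int × Int × Bool) : Int := if st.2.2 then st.1 + st.2.1 else st.1

-- the post-processing of B
def pvPost (l : List Char) (rv : Int × Int) : Int :=
  match l.getLast? with
  | some c => if c = 'X' then rv.1 + rv.2 else rv.1
  | none => rv.1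

-- irrelevant characters do not change A's state
theorem pv_foldl_filter (l : List Char) (st : Int × Int × Bool) :
    l.foldl pvStepA st = (l.filter (fun c => c == 'X' || c == '.')).foldl pvStepA st := by
  induction l generalizing st with
  | nil => rfl
  | cons c rest ih =>
    by_cases hx : c = 'X'
    · have hb : (c == 'X' || c == '.') = true := by simp [hx]
      simp [List.filter, hb, ih]
    · by_cases hd : c = '.'
      · have hb : (c == 'X' || c == '.') = true := by simp [hd]
        simp [List.filter, hb, ih]
      · have hb : (c == 'X' || c == '.') = false := by simp [hx, hd]
        have hst : pvStepA st c = st := by simp [pvStepA, hx, hd]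
        simp [List.filter, hb, hst, ih]

-- a nonempty run of '.' adds its length to the empty counter and clears the flag
theorem pv_dot_run (run : List Char) (h : ∀ c ∈ run, c = '.') (r v : Int) (p : Bool) :
    run ≠ [] → run.foldl pvStepA (r, v, p) = (r, v + run.length, false) := by
  induction run generalizing v p with
  | nil => intro h'; exact absurd rfl h'
  | cons c rest ih =>
    intro _
    have hc : c = '.' := h c (by simp)
    have hstep : pvStepA (r, v, p) c = (r, v + 1, false) := by
      simp [pvStepA, hc]
    rcases Decidable.em (rest = []) with he | he
    · subst he; simp [List.foldl, hstep]
    · have := ih (fun x hx => h x (by simp [hx])) (v + 1) false he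
      simp only [List.foldl, hstep, this, List.length_cons, Prod.mk.injEq]
      refine ⟨trivial, ?_, trivial⟩
      push_cast
      ring

-- a run of 'X' entered with the flag set flushes at most once
theorem pv_x_run_true (run : List Char) (h : ∀ c ∈ run, c = 'X') (r v : Int) :
    run.foldl pvStepA (r, v, true) = if run = [] then (r, v, true) else (r + v, 0, true) := by
  induction run generalizing r v with
  | nil => rfl
  | cons c rest ih =>
    have hc : c = 'X' := h c (by simp)
    have hstep : pvStepA (r, v, true) c = (r + v, 0, true) := by simp [pvStepA, hc]
    have := ih (fun x hx => h x (by simp [hx])) (r + v) 0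
    simp only [List.foldl, hstep, this]
    split <;> simp

-- main correspondence between A's fold over a relevant-only list and B's run walk
theorem pv_main (n : ℕ) : ∀ (l : List Char), l.length ≤ n →
    (∀ c ∈ l, c = 'X' ∨ c = '.') → ∀ (r v : Int),
    pvFin (l.foldl pvStepA (r, v, false)) = pvPost l (pvRuns l r v) := by
  induction n with
  | zero =>
    intro l hl _ r v
    have : l = [] := List.eq_nil_of_length_eq_zero (Nat.le_zero.mp hl)
    subst this; simp [pvFin, pvPost, pvRuns]
  | succ n ih =>
    intro l hl hrel r v
    match l with
    | [] => simp [pvFin, pvPost, pvRuns]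
    | c :: rest =>
      have hsplit : rest = rest.takeWhile (· == c) ++ rest.dropWhile (· == c) :=
        (List.takeWhile_append_dropWhile).symm
      set run := rest.takeWhile (· == c) with hrun
      set tail := rest.dropWhile (· == c) with htail
      have hrunc : ∀ x ∈ run, x = c := by
        intro x hx
        have := List.mem_takeWhile_imp hx
        simpa using this
      have htail_len : tail.length ≤ n := by
        have h1 := List.length_dropWhile_le (· == c) rest
        have h2 : tail.length = (List.dropWhile (· == c) rest).length := by rw [htail]
        simp only [List.length_cons] at hl
        omega
      have htail_rel : ∀ x ∈ tail, x = 'X' ∨ x = '.' := by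
        intro x hx
        exact hrel x (by rw [hsplit]; simp [hx])
      have hfold : (c :: rest).foldl pvStepA (r, v, false)
          = tail.foldl pvStepA ((c :: run).foldl pvStepA (r, v, false)) := by
        conv_lhs => rw [show (c :: rest) = (c :: run) ++ tail by rw [hsplit]; rfl]
        rw [List.foldl_append]
      have hlast_ne : tail ≠ [] → (c :: rest).getLast? = tail.getLast? := by
        intro ht
        rw [show (c :: rest) = (c :: run) ++ tail by rw [hsplit]; rfl]
        exact List.getLast?_append_of_ne_nil _ ht
      have hlast_nil : tail = [] → (c :: rest).getLast? = some c := by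
        intro ht
        have : (c :: rest) = c :: run := by rw [hsplit, ht, List.append_nil]
        rw [this]
        obtain ⟨x, hx⟩ := Option.isSome_iff_exists.mp (List.getLast?_isSome.mpr (by simp : (c :: run) ≠ []))
        have hm : x ∈ c :: run := List.mem_of_getLast? hx
        have hxc : x = c := by
          rcases List.mem_cons.mp hm with h | h
          · exact h
          · exact hrunc x h
        rw [hx, hxc]
      rcases hrel c (by simp) with hX | hD
      · -- c = 'X'
        subst hX
        have hstep1 : pvStepA (r, v, false) 'X' = (r, v, true) := by simp [pvStepA]
        have hfoldrun : (('X' : Char) :: run).foldl pvStepA (r, v, false)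
            = if run = [] then (r, v, true) else (r + v, 0, true) := by
          simp only [List.foldl, hstep1]
          exact pv_x_run_true run hrunc r v
        rcases Decidable.em (run = []) with hre | hre
        · -- run of length 1
          have hruns : pvRuns ('X' :: rest) r v = pvRuns tail r v := by
            rw [pvRuns]; simp [← hrun, ← htail, hre]
          rcases Decidable.em (tail = []) with hte | hte
          · simp [hfold, hte, hre, hruns, pvFin, pvPost, pvRuns, pvStepA, hlast_nil hte]
          · -- tail nonempty; its head is '.'
            obtain ⟨d, rest', hdt⟩ := List.exists_cons_of_ne_nil hte
            have hdnot : ¬ (d == 'X') := by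
              have := List.head?_dropWhile_not (· == 'X') rest
              rw [← htail, hdt] at this
              simpa using this
            have hdd : d = '.' := by
              rcases htail_rel d (by rw [hdt]; simp) with h | h
              · exact absurd (by simp [h]) hdnot
              · exact h
            have hswap : tail.foldl pvStepA (r, v, true) = tail.foldl pvStepA (r, v, false) := by
              rw [hdt]
              simp only [List.foldl]
              have : pvStepA (r, v, true) d = pvStepA (r, v, false) d := by
                simp [pvStepA, hdd]
              rw [this]
            rw [hfold, hfoldrun, if_pos hre, hswap, ih tail htail_len htail_rel r v,
              hruns, pvPost, pvPost, hlast_ne hte]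
        · -- run length ≥ 2
          have hruns : pvRuns ('X' :: rest) r v = pvRuns tail (r + v) 0 := by
            rw [pvRuns]
            have : run.length + 1 ≥ 2 := by
              have : run.length ≠ 0 := by simpa [List.length_eq_zero_iff] using hre
              omega
            simp [← hrun, ← htail, this]
          rcases Decidable.em (tail = []) with hte | hte
          · simp [hfold, hte, hfoldrun, hre, hruns, pvFin, pvPost, pvRuns, hlast_nil hte]
          · obtain ⟨d, rest', hdt⟩ := List.exists_cons_of_ne_nil hte
            have hdnot : ¬ (d == 'X') := by
              have := List.head?_dropWhile_not (· == 'X') rest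
              rw [← htail, hdt] at this
              simpa using this
            have hdd : d = '.' := by
              rcases htail_rel d (by rw [hdt]; simp) with h | h
              · exact absurd (by simp [h]) hdnot
              · exact h
            have hswap : tail.foldl pvStepA (r + v, 0, true) = tail.foldl pvStepA (r + v, 0, false) := by
              rw [hdt]
              simp only [List.foldl]
              have : pvStepA (r + v, 0, true) d = pvStepA (r + v, 0, false) d := by
                simp [pvStepA, hdd]
              rw [this]
            rw [hfold, hfoldrun, if_neg hre, hswap, ih tail htail_len htail_rel (r + v) 0,
              hruns, pvPost, pvPost, hlast_ne hte]
      · -- c = '.'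
        subst hD
        have hfoldrun : (('.' : Char) :: run).foldl pvStepA (r, v, false)
            = (r, v + (run.length + 1), false) := by
          have := pv_dot_run ('.' :: run) (by
            intro x hx
            rcases List.mem_cons.mp hx with h | h
            · exact h
            · exact hrunc x h) r v false (by simp)
          rw [this]
          simp only [List.length_cons, Prod.mk.injEq]
          refine ⟨trivial, ?_, trivial⟩
          push_cast
          ring
        have hruns : pvRuns ('.' :: rest) r v = pvRuns tail r (v + (run.length + 1)) := by
          rw [pvRuns]; simp [← hrun, ← htail]
        rcases Decidable.em (tail = []) with hte | hte
        · simp [hfold, hte, hfoldrun, hruns, pvFin, pvPost, pvRuns, hlast_nil hte]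
        · rw [hfold, hfoldrun, ih tail htail_len htail_rel r (v + (run.length + 1)),
            hruns, pvPost, pvPost, hlast_ne hte]

-- ===== VERDICT (by name: the statement is the Claim_ definition above) =====
theorem calcular_mijoes_nao_constrangedores_spec : Claim_equal_calcular_mijoes_nao_constrangedores := by
  intro s _
  unfold Spec_calcular_mijoes_nao_constrangedores
  unfold calcular_mijoes_nao_constrangedores calcular_mijoes_nao_constrangedores_alt
  set fl := s.toList.filter (fun c => c == 'X' || c == '.') with hfl
  have hrel : ∀ c ∈ fl, c = 'X' ∨ c = '.' := by
    intro c hc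
    have := List.of_mem_filter hc
    rcases Bool.or_eq_true_iff.mp this with h | h
    · exact Or.inl (by simpa using h)
    · exact Or.inr (by simpa using h)
  have := pv_main fl.length fl (le_refl _) hrel 0 0
  simp only [pvFin, pvPost] at this
  rw [pv_foldl_filter, ← hfl]
  exact this
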